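-- pv_equiv track=rewrite | github.com/gditzler/Fizzy | src/fizzy.py | convert_to_discrete
-- ===== SOURCE A (Python) =====
-- def convert_to_discrete(items):
--   map_dic = {}
--   discrete_arr = []
--
--   # skip the "sample"
--   disc_val = 0
--   for item in items:
--     if item not in map_dic:
--        map_dic[item] = disc_val
--        disc_val += 1
--     discrete_arr.append(map_dic[item])
--
--   return (map_dic, discrete_arr)
-- ===== SOURCE B (Python) =====
-- def convert_to_discrete(items):
--   # label = rank of an item's first-occurrence position among all first-occurrence positions
--   firsts = sorted({items.index(x) for x in items})
--   map_dic = {items[p]: k for k, p in enumerate(firsts)}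
--   discrete_arr = [firsts.index(items.index(x)) for x in items]
--   return (map_dic, discrete_arr)
-- ===== Notes on version B (the rewrite author's own statement) =====
-- stated objective: alternative
-- what changed: Positional relabelling instead of A's assign-on-first-sight counter: B computes every item's first-occurrence position with list.index, sorts the set of those positions, and a label is the rank of the item's first position in that sorted list; no incremental dict/counter state is threaded through the scan.
import Mathlib
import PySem

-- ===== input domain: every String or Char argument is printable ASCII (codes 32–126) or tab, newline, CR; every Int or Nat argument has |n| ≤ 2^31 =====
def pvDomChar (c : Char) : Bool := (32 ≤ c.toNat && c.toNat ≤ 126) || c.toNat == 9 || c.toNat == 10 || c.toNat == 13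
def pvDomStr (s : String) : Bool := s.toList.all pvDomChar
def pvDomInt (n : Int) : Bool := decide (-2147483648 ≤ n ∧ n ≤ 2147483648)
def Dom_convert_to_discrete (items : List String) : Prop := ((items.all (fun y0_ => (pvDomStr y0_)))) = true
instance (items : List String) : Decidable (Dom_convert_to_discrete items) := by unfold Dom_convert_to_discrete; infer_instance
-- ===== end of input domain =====

-- B replaces A's assign-on-first-sight counter by positional relabelling: sort the set of
-- first-occurrence positions (list.index) and label each item by the rank of its first position
-- (alternative algorithm; same results, no incremental labelling state).

-- ===== PORT A =====
-- loop body of A: maybe assign a fresh label, then append map_dic[item]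
def cdStep (st : PySem.Dict String Int × List Int × Int) (item : String) :
    PySem.Dict String Int × List Int × Int :=
  let d := if st.1.contains item then st.1 else st.1.insert item st.2.2
  let v := if st.1.contains item then st.2.2 else st.2.2 + 1
  (d, st.2.1 ++ [d.getD item 0], v)    -- map_dic[item] cannot miss: item was just ensured present

def convert_to_discrete (items : List String) : (List (String × Int)) × List Int :=
  let fin := items.foldl cdStep ((PySem.Dict.empty : PySem.Dict String Int), ([] : List Int), (0 : Int))
  (fin.1.items, fin.2.1)

-- ===== PORT B =====
def convert_to_discrete_alt (items : List String) : (List (String × Int)) × List Int :=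
  -- firsts = sorted({items.index(x) for x in items}); items.index never raises here (x is drawn
  -- from items), so index? is always some and .getD 0 is exact
  let firsts : List Int :=
    PySem.List.sorted
      (PySem.Set.ofList (items.map (fun x => (((PySem.List.index? items x).getD 0 : Nat) : Int))))
      (fun v => v) false
  -- map_dic = {items[p]: k for k, p in enumerate(firsts)}; p is a valid index, so pyGet? is some
  let map_dic : PySem.Dict String Int :=
    PySem.Dict.ofList ((PySem.List.enumerate firsts).map
      (fun kp => ((PySem.List.pyGet? items kp.2).getD "", kp.1)))
  -- discrete_arr = [firsts.index(items.index(x)) for x in items]; both lookups always hit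
  (map_dic.items,
   items.map (fun x =>
     (((PySem.List.index? firsts (((PySem.List.index? items x).getD 0 : Nat) : Int)).getD 0 : Nat) : Int)))

-- ===== PRECONDITION & SPEC =====
def Spec_convert_to_discrete (items : List String) (out : (List (String × Int)) × List Int) : Prop := out = convert_to_discrete_alt items
instance (items : List String) (out : (List (String × Int)) × List Int) : Decidable (Spec_convert_to_discrete items out) := by unfold Spec_convert_to_discrete; infer_instance

-- ===== CLAIM (what is proved, stated in full; the proofs are below) =====
def Claim_equal_convert_to_discrete : Prop := ∀ (items : List String), Dom_convert_to_discrete items → Spec_convert_to_discrete items (convert_to_discrete items)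

-- ===== LEMMAS AND PROOFS =====

-- the canonical dictionary: dedup items (first occurrences, in order) numbered 0,1,2,…
def dDict (q : List String) : PySem.Dict String Int :=
  PySem.Dict.ofList ((PySem.List.enumerate (PySem.List.dedup q)).map (fun p => (p.2, p.1)))

lemma items_dDict (q : List String) :
    (dDict q).items = (PySem.List.enumerate (PySem.List.dedup q)).map (fun p => (p.2, p.1)) := by
  unfold dDict
  rw [show PySem.Dict.ofList ((PySem.List.enumerate (PySem.List.dedup q)).map (fun p => (p.2, p.1))) =
      ((PySem.List.enumerate (PySem.List.dedup q)).map (fun p => (p.2, p.1))).foldl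
        (fun d a => d.insert (Prod.fst a) (Prod.snd a)) PySem.Dict.empty from rfl]
  rw [PySem.Dict.items_foldl_insert_fresh _ Prod.fst Prod.snd PySem.Dict.empty
      (by intro a _; simp [pysem])
      (by rw [List.map_map]
          have : (Prod.fst ∘ fun p : Int × String => (p.2, p.1)) = (fun p : Int × String => p.2) := rfl
          rw [this, PySem.List.map_snd_enumerate]
          exact PySem.List.nodup_dedup q)]
  rw [show (PySem.Dict.empty : PySem.Dict String Int).items = [] from rfl, List.nil_append,
      show (fun a : String × Int => ((a.1, a.2) : String × Int)) = id from rfl, List.map_id]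

lemma keys_dDict (q : List String) : (dDict q).keys = PySem.List.dedup q := by
  have h : (dDict q).keys = (dDict q).items.map (·.1) := rfl
  rw [h, items_dDict, List.map_map]
  have : ((fun p : String × Int => p.1) ∘ fun p : Int × String => (p.2, p.1)) =
      (fun p : Int × String => p.2) := rfl
  rw [this, PySem.List.map_snd_enumerate]

lemma mem_enumerate_idxOf (l : List String) (s : String) (hs : s ∈ l) (n : Int) :
    ((n + (l.idxOf s : Int), s)) ∈ PySem.List.enumerate l n := by
  induction l generalizing n with
  | nil => cases hs
  | cons k t ih =>
    rw [PySem.List.enumerate_cons]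
    by_cases h : k = s
    · subst h
      simp [List.idxOf_cons_self]
    · have hst : s ∈ t := by
        cases hs with
        | head => exact absurd rfl h
        | tail _ h' => exact h'
      rw [List.idxOf_cons_ne _ h]
      refine List.mem_cons_of_mem _ ?_
      have := ih hst (n + 1)
      convert this using 2
      push_cast
      omega

lemma getD_dDict (q : List String) (s : String) (hs : s ∈ q) :
    (dDict q).getD s 0 = ((PySem.List.dedup q).idxOf s : Int) := by
  have hk : (dDict q).keys.Nodup := by
    rw [keys_dDict]; exact PySem.List.nodup_dedup q
  have hsd : s ∈ PySem.List.dedup q := (PySem.List.mem_dedup q s).2 hs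
  have hm : (s, ((PySem.List.dedup q).idxOf s : Int)) ∈ (dDict q).items := by
    rw [items_dDict]
    refine List.mem_map.2 ⟨(((PySem.List.dedup q).idxOf s : Int), s), ?_, rfl⟩
    have := mem_enumerate_idxOf (PySem.List.dedup q) s hsd 0
    rwa [zero_add] at this
  exact PySem.Dict.getD_of_mem_items _ hm hk 0

lemma enumerate_append_singleton (l : List String) (x : String) (n : Int) :
    PySem.List.enumerate (l ++ [x]) n = PySem.List.enumerate l n ++ [(n + l.length, x)] := by
  induction l generalizing n with
  | nil => simp [PySem.List.enumerate_cons, PySem.List.enumerate_nil]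
  | cons k t ih =>
    rw [List.cons_append, PySem.List.enumerate_cons, PySem.List.enumerate_cons, ih (n + 1)]
    simp only [List.cons_append, List.length_cons]
    have harg : n + 1 + (t.length : Int) = n + ((t.length + 1 : Nat) : Int) := by push_cast; ring
    rw [harg]

lemma dedup_append_singleton (p : List String) (x : String) :
    PySem.List.dedup (p ++ [x]) =
      if x ∈ p then PySem.List.dedup p else PySem.List.dedup p ++ [x] := by
  have hsplit : PySem.Set.ofList (p ++ [x]) = PySem.Set.add (PySem.Set.ofList p) x := by
    rw [PySem.Set.ofList_eq_foldl, PySem.Set.ofList_eq_foldl, List.foldl_append]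
    rfl
  have hadd : PySem.Set.add (PySem.Set.ofList p) x =
      if PySem.Set.contains (PySem.Set.ofList p) x then PySem.Set.ofList p
      else PySem.Set.ofList p ++ [x] := rfl
  have hc : PySem.Set.contains (PySem.Set.ofList p) x = decide (x ∈ p) := by
    have h1 : PySem.Set.contains (PySem.Set.ofList p) x = decide (x ∈ PySem.Set.ofList p) := by
      simp [PySem.Set.contains]
    rw [h1]
    simp [PySem.Set.mem_ofList]
  rw [PySem.List.dedup_eq_ofList, PySem.List.dedup_eq_ofList, hsplit, hadd, hc]
  by_cases hx : x ∈ p <;> simp [hx]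

lemma contains_dDict (q : List String) (x : String) :
    (dDict q).contains x = decide (x ∈ q) := by
  rw [PySem.Dict.contains_eq_decide_mem_keys, keys_dDict]
  simp

lemma dDict_insert (p : List String) (x : String) (hx : x ∉ p) :
    (dDict p).insert x ((PySem.List.dedup p).length : Int) = dDict (p ++ [x]) := by
  have hc : (dDict p).contains x = false := by
    rw [contains_dDict]; simp [hx]
  apply PySem.Dict.ext
  rw [PySem.Dict.items_insert_of_not_contains _ _ hc, items_dDict, items_dDict,
      dedup_append_singleton, if_neg hx, enumerate_append_singleton]
  simp

lemma cdStep_dDict (p : List String) (arr : List Int) (x : String) :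
    cdStep (dDict p, arr, ((PySem.List.dedup p).length : Int)) x =
      (dDict (p ++ [x]), arr ++ [((PySem.List.dedup (p ++ [x])).idxOf x : Int)],
       ((PySem.List.dedup (p ++ [x])).length : Int)) := by
  have hc := contains_dDict p x
  by_cases hx : x ∈ p
  · have hd : PySem.List.dedup (p ++ [x]) = PySem.List.dedup p := by
      rw [dedup_append_singleton, if_pos hx]
    have hdd : dDict (p ++ [x]) = dDict p := by unfold dDict; rw [hd]
    simp only [cdStep, hc, hx, decide_true, if_true, hdd, hd]
    rw [getD_dDict p x hx]
  · have hd : PySem.List.dedup (p ++ [x]) = PySem.List.dedup p ++ [x] := by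
      rw [dedup_append_singleton, if_neg hx]
    simp only [cdStep, hc, hx, decide_false, Bool.false_eq_true, if_false]
    rw [dDict_insert p x hx]
    refine Prod.ext rfl (Prod.ext ?_ ?_)
    · rw [getD_dDict (p ++ [x]) x (by simp)]
    · simp only [hd, List.length_append, List.length_cons, List.length_nil]
      push_cast
      omega

lemma dedup_extend (p r : List String) :
    ∃ t, PySem.List.dedup (p ++ r) = PySem.List.dedup p ++ t := by
  induction r generalizing p with
  | nil => exact ⟨[], by simp⟩
  | cons y r' ih =>
    obtain ⟨t', ht'⟩ := ih (p ++ [y])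
    rw [show p ++ y :: r' = (p ++ [y]) ++ r' by simp]
    by_cases hy : y ∈ p
    · exact ⟨t', by rw [ht', dedup_append_singleton, if_pos hy]⟩
    · exact ⟨y :: t', by rw [ht', dedup_append_singleton, if_neg hy]; simp⟩

lemma idx_stable (p r : List String) (s : String) (hs : s ∈ p) :
    (PySem.List.dedup (p ++ r)).idxOf s = (PySem.List.dedup p).idxOf s := by
  obtain ⟨t, ht⟩ := dedup_extend p r
  rw [ht]
  exact List.idxOf_append_of_mem ((PySem.List.mem_dedup p s).2 hs)

lemma loopA (rest p : List String) (arr : List Int) :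
    rest.foldl cdStep (dDict p, arr, ((PySem.List.dedup p).length : Int)) =
      (dDict (p ++ rest),
       arr ++ rest.map (fun x => ((PySem.List.dedup (p ++ rest)).idxOf x : Int)),
       ((PySem.List.dedup (p ++ rest)).length : Int)) := by
  induction rest generalizing p arr with
  | nil => simp
  | cons x r ih =>
    rw [List.foldl_cons, cdStep_dDict, ih (p ++ [x])]
    have hpp : (p ++ [x]) ++ r = p ++ x :: r := by simp
    rw [hpp]
    refine Prod.ext rfl (Prod.ext ?_ rfl)
    simp only [List.map_cons, List.append_assoc, List.cons_append, List.nil_append]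
    congr 2
    have := idx_stable (p ++ [x]) r x (by simp)
    rw [hpp] at this
    rw [← this]

-- A computes the canonical result
lemma A_eq (items : List String) :
    convert_to_discrete items =
      ((dDict items).items,
       items.map (fun x => ((PySem.List.dedup items).idxOf x : Int))) := by
  unfold convert_to_discrete
  have h0 : ((PySem.Dict.empty : PySem.Dict String Int), ([] : List Int), (0 : Int)) =
      (dDict [], ([] : List Int), ((PySem.List.dedup ([] : List String)).length : Int)) := rfl
  rw [h0, loopA items [] []]
  simp

-- ===== B-side lemmas =====

-- Python's list.index on a present element is idxOf
lemma index?_of_mem {α : Type} [BEq α] [LawfulBEq α] (l : List α) (v : α) (h : v ∈ l) :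
    PySem.List.index? l v = some (l.idxOf v) := by
  induction l with
  | nil => cases h
  | cons a t ih =>
    by_cases ha : a = v
    · subst ha; rw [PySem.List.index?_cons_self, List.idxOf_cons_self]
    · have hv : v ∈ t := by
        cases h with
        | head => exact absurd rfl ha
        | tail _ h' => exact h'
      rw [PySem.List.index?_cons_of_ne _ ha, ih hv, List.idxOf_cons_ne _ ha]
      rfl

-- idxOf is preserved by a map injective on the list and the sought element
lemma idxOf_map_of_inj (l : List String) (f : String → Int) (x : String) (hx : x ∈ l)
    (hinj : ∀ a ∈ l, f a = f x → a = x) :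
    (l.map f).idxOf (f x) = l.idxOf x := by
  induction l with
  | nil => cases hx
  | cons a t ih =>
    by_cases ha : a = x
    · subst ha; simp [List.idxOf_cons_self]
    · have hfa : f a ≠ f x := fun he => ha (hinj a (List.mem_cons_self) he)
      have hxt : x ∈ t := by
        cases hx with
        | head => exact absurd rfl ha
        | tail _ h' => exact h'
      rw [List.map_cons, List.idxOf_cons_ne _ hfa, List.idxOf_cons_ne _ ha,
          ih hxt (fun a ha' => hinj a (List.mem_cons_of_mem _ ha'))]

-- enumerate of a mapped list
lemma enumerate_map (l : List String) (g : String → Int) (n : Int) :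
    PySem.List.enumerate (l.map g) n =
      (PySem.List.enumerate l n).map (fun p => (p.1, g p.2)) := by
  induction l generalizing n with
  | nil => simp [PySem.List.enumerate_nil]
  | cons a t ih => simp [PySem.List.enumerate_cons, ih]

-- the first-occurrence-position map
def fpos (items : List String) (x : String) : Int := (items.idxOf x : Int)

lemma fpos_inj (items : List String) (a x : String) (ha : a ∈ items) (hx : x ∈ items)
    (h : fpos items a = fpos items x) : a = x := by
  unfold fpos at h
  have h' : items.idxOf a = items.idxOf x := by exact_mod_cast h
  have h1 : items[items.idxOf a]'(List.idxOf_lt_length_of_mem ha) = a := List.getElem_idxOf _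
  have h2 : items[items.idxOf x]'(List.idxOf_lt_length_of_mem hx) = x := List.getElem_idxOf _
  rw [← h1, ← h2]
  simp [h']

-- the set of first positions, in first-appearance order, is dedup mapped through fpos
lemma ofList_map_fpos (items p : List String) (hp : ∀ y ∈ p, y ∈ items) :
    PySem.Set.ofList (p.map (fpos items)) = (PySem.List.dedup p).map (fpos items) := by
  induction p using List.reverseRecOn with
  | nil => rfl
  | append_singleton q x ih =>
    have hq : ∀ y ∈ q, y ∈ items := fun y hy => hp y (List.mem_append_left _ hy)
    have hxi : x ∈ items := hp x (by simp)
    have hsplit : PySem.Set.ofList ((q ++ [x]).map (fpos items)) =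
        PySem.Set.add (PySem.Set.ofList (q.map (fpos items))) (fpos items x) := by
      rw [List.map_append, PySem.Set.ofList_eq_foldl, PySem.Set.ofList_eq_foldl, List.foldl_append]
      rfl
    rw [hsplit, ih hq, dedup_append_singleton]
    have hcont : PySem.Set.contains ((PySem.List.dedup q).map (fpos items)) (fpos items x) =
        decide (x ∈ q) := by
      have h1 : PySem.Set.contains ((PySem.List.dedup q).map (fpos items)) (fpos items x) =
          decide (fpos items x ∈ (PySem.List.dedup q).map (fpos items)) := by
        simp [PySem.Set.contains]
      rw [h1]
      by_cases hx : x ∈ q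
      · have hm : fpos items x ∈ (PySem.List.dedup q).map (fpos items) :=
          List.mem_map.2 ⟨x, (PySem.List.mem_dedup q x).2 hx, rfl⟩
        rw [decide_eq_true hm, decide_eq_true hx]
      · have hm : fpos items x ∉ (PySem.List.dedup q).map (fpos items) := by
          intro hm
          obtain ⟨y, hy, hyx⟩ := List.mem_map.1 hm
          have hyq : y ∈ q := (PySem.List.mem_dedup q y).1 hy
          exact hx (fpos_inj items y x (hq y hyq) hxi hyx ▸ hyq)
        rw [decide_eq_false hm, decide_eq_false hx]
    rw [show PySem.Set.add ((PySem.List.dedup q).map (fpos items)) (fpos items x) =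
        if PySem.Set.contains ((PySem.List.dedup q).map (fpos items)) (fpos items x)
        then (PySem.List.dedup q).map (fpos items)
        else (PySem.List.dedup q).map (fpos items) ++ [fpos items x] from rfl, hcont]
    by_cases hx : x ∈ q <;> simp [hx]

-- first positions along dedup are strictly increasing
lemma dedup_fpos_pairwise (p : List String) :
    ((PySem.List.dedup p).map (fpos p)).Pairwise (· < ·) := by
  induction p using List.reverseRecOn with
  | nil => simp
  | append_singleton q x ih =>
    have hstable : ∀ y ∈ q, fpos (q ++ [x]) y = fpos q y := by
      intro y hy
      unfold fpos
      rw [List.idxOf_append_of_mem hy]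
    rw [dedup_append_singleton]
    by_cases hx : x ∈ q
    · rw [if_pos hx]
      have : (PySem.List.dedup q).map (fpos (q ++ [x])) = (PySem.List.dedup q).map (fpos q) :=
        List.map_congr_left (fun y hy => hstable y ((PySem.List.mem_dedup q y).1 hy))
      rw [this]; exact ih
    · rw [if_neg hx, List.map_append,
          List.map_congr_left (fun y hy => hstable y ((PySem.List.mem_dedup q y).1 hy))]
      rw [List.pairwise_append]
      refine ⟨ih, by simp, ?_⟩
      intro a ha b hb
      obtain ⟨y, hy, hya⟩ := List.mem_map.1 ha
      simp only [List.map_cons, List.map_nil, List.mem_singleton] at hb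
      subst hb
      have hyq : y ∈ q := (PySem.List.mem_dedup q y).1 hy
      have h1 : q.idxOf y < q.length := List.idxOf_lt_length_of_mem hyq
      have h2 : fpos (q ++ [x]) x = (q.length : Int) := by
        unfold fpos
        rw [List.idxOf_append_of_notMem hx]
        simp [List.idxOf_cons_self]
      rw [← hya, h2]
      unfold fpos
      exact_mod_cast h1

lemma B_eq (items : List String) :
    convert_to_discrete_alt items =
      ((dDict items).items,
       items.map (fun x => ((PySem.List.dedup items).idxOf x : Int))) := by
  unfold convert_to_discrete_alt
  -- the raw index? expression is fpos on members of items
  have hidx : ∀ x ∈ items,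
      (((PySem.List.index? items x).getD 0 : Nat) : Int) = fpos items x := by
    intro x hx
    rw [index?_of_mem items x hx]
    rfl
  have hmap : items.map (fun x => (((PySem.List.index? items x).getD 0 : Nat) : Int)) =
      items.map (fpos items) := List.map_congr_left hidx
  have hfirsts : PySem.List.sorted
      (PySem.Set.ofList (items.map (fun x => (((PySem.List.index? items x).getD 0 : Nat) : Int))))
      (fun v => v) false = (PySem.List.dedup items).map (fpos items) := by
    rw [hmap, ofList_map_fpos items items (fun _ h => h)]
    exact PySem.List.sorted_eq_self_of_pairwise _ _
      ((dedup_fpos_pairwise items).imp (fun h => le_of_lt h))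
  rw [hfirsts]
  refine Prod.ext ?_ ?_
  · -- the dictionary
    show (PySem.Dict.ofList ((PySem.List.enumerate ((PySem.List.dedup items).map (fpos items))).map
      (fun kp => ((PySem.List.pyGet? items kp.2).getD "", kp.1)))).items = (dDict items).items
    rw [enumerate_map, List.map_map]
    have hpt : ((PySem.List.enumerate (PySem.List.dedup items) 0).map
        ((fun kp : Int × Int => ((PySem.List.pyGet? items kp.2).getD "", kp.1)) ∘
          (fun p : Int × String => (p.1, fpos items p.2)))) =
        (PySem.List.enumerate (PySem.List.dedup items) 0).map (fun p => (p.2, p.1)) := by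
      refine List.map_congr_left ?_
      intro q hq
      obtain ⟨k, hk, hqe⟩ := (PySem.List.mem_enumerate_iff _ _ _).1 hq
      subst hqe
      simp only [Function.comp]
      have hmem : (PySem.List.dedup items)[k] ∈ items :=
        (PySem.List.mem_dedup items _).1 (List.getElem_mem hk)
      have hlt : items.idxOf (PySem.List.dedup items)[k] < items.length :=
        List.idxOf_lt_length_of_mem hmem
      have : PySem.List.pyGet? items (fpos items (PySem.List.dedup items)[k]) =
          some (items[items.idxOf (PySem.List.dedup items)[k]]'hlt) := by
        unfold fpos
        rw [PySem.List.pyGet?_natCast]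
        exact List.getElem?_eq_getElem hlt
      rw [this]
      simp [List.getElem_idxOf]
    rw [hpt]
    exact (items_dDict items).symm ▸ rfl
  · -- the labels
    refine List.map_congr_left ?_
    intro x hx
    rw [index?_of_mem items x hx]
    have hfx : (((items.idxOf x : Nat) : Int)) = fpos items x := rfl
    show (((PySem.List.index? ((PySem.List.dedup items).map (fpos items))
        (((items.idxOf x : Nat) : Int))).getD 0 : Nat) : Int) =
      ((PySem.List.dedup items).idxOf x : Int)
    rw [hfx]
    have hxd : x ∈ PySem.List.dedup items := (PySem.List.mem_dedup items x).2 hx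
    have hmem : fpos items x ∈ (PySem.List.dedup items).map (fpos items) :=
      List.mem_map.2 ⟨x, hxd, rfl⟩
    rw [index?_of_mem _ _ hmem]
    have h := idxOf_map_of_inj (PySem.List.dedup items) (fpos items) x hxd
      (fun a ha he => fpos_inj items a x ((PySem.List.mem_dedup items a).1 ha) hx he)
    rw [Option.getD_some, h]

-- ===== VERDICT (by name: the statement is the Claim_ definition above) =====
theorem convert_to_discrete_spec : Claim_equal_convert_to_discrete := by
  intro items _
  unfold Spec_convert_to_discrete
  rw [A_eq, B_eq]
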